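-- pv_equiv track=rewrite | github.com/vanchien/ToolFB | src/services/post_history_service.py | normalized_hashtag_set
-- ===== SOURCE A (Python) =====
-- def normalized_hashtag_set(tags: list[str] | None) -> tuple[str, ...]:
--     """Chuẩn hóa hashtag để so sánh tập (thứ tự không quan trọng)."""
--     if not tags:
--         return tuple()
--     cleaned: set[str] = set()
--     for t in tags:
--         s = str(t).strip().lower().lstrip("#")
--         if s:
--             cleaned.add(s)
--     return tuple(sorted(cleaned))
-- ===== SOURCE B (Python) =====
-- def _merge_unique(l: list[str]) -> list[str]:
--     """Sort l and drop duplicates by divide and conquer: merge sorted unique halves."""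
--     if len(l) <= 1:
--         return l
--     mid = len(l) // 2
--     a = _merge_unique(l[:mid])
--     b = _merge_unique(l[mid:])
--     out: list[str] = []
--     i = j = 0
--     while i < len(a) and j < len(b):
--         if a[i] < b[j]:
--             out.append(a[i]); i += 1
--         elif b[j] < a[i]:
--             out.append(b[j]); j += 1
--         else:
--             out.append(a[i]); i += 1; j += 1
--     out.extend(a[i:])
--     out.extend(b[j:])
--     return out
--
--
-- def normalized_hashtag_set(tags: list[str] | None) -> tuple[str, ...]:
--     """Chuẩn hóa hashtag để so sánh tập (thứ tự không quan trọng)."""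
--     if not tags:
--         return tuple()
--     cleaned = [s for s in (str(t).strip().lower().lstrip("#") for t in tags) if s]
--     return tuple(_merge_unique(cleaned))
-- ===== Notes on version B (the rewrite author's own statement) =====
-- stated objective: alternative
-- what changed: Replaces the hash-set dedup plus library sort with a divide-and-conquer merge sort whose merge step also collapses duplicates, so the sorted unique result is built directly with no set and no sort call.
import Mathlib
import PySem

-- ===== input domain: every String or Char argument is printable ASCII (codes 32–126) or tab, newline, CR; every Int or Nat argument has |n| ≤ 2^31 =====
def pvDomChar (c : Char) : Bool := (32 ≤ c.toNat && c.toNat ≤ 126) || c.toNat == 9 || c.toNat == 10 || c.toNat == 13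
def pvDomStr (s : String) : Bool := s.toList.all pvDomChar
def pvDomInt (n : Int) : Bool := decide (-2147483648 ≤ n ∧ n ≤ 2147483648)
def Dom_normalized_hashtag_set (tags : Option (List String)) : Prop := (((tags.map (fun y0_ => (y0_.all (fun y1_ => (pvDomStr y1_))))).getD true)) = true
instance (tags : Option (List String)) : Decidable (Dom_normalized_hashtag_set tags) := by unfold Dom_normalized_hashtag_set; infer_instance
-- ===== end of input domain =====

-- B replaces A's hash-set-then-sort with a divide-and-conquer merge sort whose merge
-- step collapses duplicates, building the sorted unique result directly (objective: alternative).

-- shared cleaning step: str(t).strip().lower().lstrip("#");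
-- lstrip("#") is ported by hand as dropWhile (· == '#') — exact (drops exactly all leading '#')
def nhsClean (t : String) : String :=
  String.ofList ((PySem.Str.lower (PySem.Str.strip t)).toList.dropWhile (fun c => c == '#'))

-- ===== PORT A =====
def normalized_hashtag_set (tags : Option (List String)) : List String :=
  match tags with
  | none => []
  | some ts =>
    if ts = [] then []
    else
      let cleaned : PySem.Set String := ts.foldl (fun acc t =>
        if nhsClean t ≠ "" then PySem.Set.add acc (nhsClean t) else acc) PySem.Set.empty
      PySem.List.sorted cleaned (fun x => x) false

-- ===== PORT B =====
-- merge of two sorted duplicate-free lists, collapsing duplicates across them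
-- (transcribes Source B's while-loop merge + the two extends for the leftovers)
def nhsMerge : List String → List String → List String
  | [], b => b
  | x :: a, [] => x :: a
  | x :: a, y :: b =>
    if x < y then x :: nhsMerge a (y :: b)
    else if y < x then y :: nhsMerge (x :: a) b
    else x :: nhsMerge a b
termination_by a b => a.length + b.length

-- _merge_unique: divide and conquer on the list, halving at len//2
def nhsMergeUnique (l : List String) : List String :=
  if _h : l.length ≤ 1 then l
  else
    nhsMerge (nhsMergeUnique (l.take (l.length / 2))) (nhsMergeUnique (l.drop (l.length / 2)))
termination_by l.length
decreasing_by
  · simp only [List.length_take]; omega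
  · simp only [List.length_drop]; omega

def normalized_hashtag_set_alt (tags : Option (List String)) : List String :=
  match tags with
  | none => []
  | some ts =>
    if ts = [] then []
    else
      nhsMergeUnique ((ts.map nhsClean).filter (fun s => s ≠ ""))

-- ===== PRECONDITION & SPEC =====
def Spec_normalized_hashtag_set (tags : Option (List String)) (out : List String) : Prop := out = normalized_hashtag_set_alt tags
instance (tags : Option (List String)) (out : List String) : Decidable (Spec_normalized_hashtag_set tags out) := by unfold Spec_normalized_hashtag_set; infer_instance

-- ===== CLAIM =====
def Claim_equal_normalized_hashtag_set : Prop := ∀ (tags : Option (List String)), Dom_normalized_hashtag_set tags → Spec_normalized_hashtag_set tags (normalized_hashtag_set tags)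

-- ===== LEMMAS AND PROOFS =====

-- merge of two strictly sorted lists is strictly sorted, members are the union
theorem nhsMerge_facts : ∀ (a b : List String), a.Pairwise (· < ·) → b.Pairwise (· < ·) →
    (nhsMerge a b).Pairwise (· < ·) ∧ (∀ x, x ∈ nhsMerge a b ↔ x ∈ a ∨ x ∈ b) := by
  intro a b
  induction a, b using nhsMerge.induct with
  | case1 b => intro _ hb; rw [nhsMerge]; exact ⟨hb, fun x => by simp⟩
  | case2 x a => intro ha _; rw [nhsMerge]; exact ⟨ha, fun x => by simp⟩
  | case3 x a y b hxy ih =>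
    intro ha hb
    obtain ⟨hxa, ha'⟩ := List.pairwise_cons.mp ha
    obtain ⟨hyb, hb'⟩ := List.pairwise_cons.mp hb
    obtain ⟨ihp, ihm⟩ := ih ha' hb
    rw [nhsMerge, if_pos hxy]
    constructor
    · refine List.pairwise_cons.mpr ⟨?_, ihp⟩
      intro t ht
      rcases (ihm t).mp ht with h' | h'
      · exact hxa t h'
      · rcases List.mem_cons.mp h' with h'' | h''
        · exact h'' ▸ hxy
        · exact lt_trans hxy (hyb t h'')
    · intro z; simp [ihm z]; tauto
  | case4 x a y b hxy hyx ih =>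
    intro ha hb
    obtain ⟨hxa, ha'⟩ := List.pairwise_cons.mp ha
    obtain ⟨hyb, hb'⟩ := List.pairwise_cons.mp hb
    obtain ⟨ihp, ihm⟩ := ih ha hb'
    rw [nhsMerge, if_neg hxy, if_pos hyx]
    constructor
    · refine List.pairwise_cons.mpr ⟨?_, ihp⟩
      intro t ht
      rcases (ihm t).mp ht with h' | h'
      · rcases List.mem_cons.mp h' with h'' | h''
        · exact h'' ▸ hyx
        · exact lt_trans hyx (hxa t h'')
      · exact hyb t h'
    · intro z; simp [ihm z]; tauto
  | case5 x a y b hxy hyx ih =>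
    intro ha hb
    obtain ⟨hxa, ha'⟩ := List.pairwise_cons.mp ha
    obtain ⟨hyb, hb'⟩ := List.pairwise_cons.mp hb
    obtain ⟨ihp, ihm⟩ := ih ha' hb'
    have hxey : x = y := le_antisymm (not_lt.mp hyx) (not_lt.mp hxy)
    rw [nhsMerge, if_neg hxy, if_neg hyx]
    constructor
    · refine List.pairwise_cons.mpr ⟨?_, ihp⟩
      intro t ht
      rcases (ihm t).mp ht with h' | h'
      · exact hxa t h'
      · exact hxey ▸ hyb t h'
    · intro z
      simp [ihm z, hxey]
      tauto

-- _merge_unique returns a strictly sorted list with exactly the input's members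
theorem nhsMergeUnique_facts (l : List String) :
    (nhsMergeUnique l).Pairwise (· < ·) ∧ (∀ x, x ∈ nhsMergeUnique l ↔ x ∈ l) := by
  induction l using nhsMergeUnique.induct with
  | case1 l h =>
    rw [nhsMergeUnique, dif_pos h]
    cases l with
    | nil => simp
    | cons a t =>
      have : t = [] := by
        cases t with
        | nil => rfl
        | cons b u => simp at h
      subst this; simp
  | case2 l h ih1 ih2 =>
    rw [nhsMergeUnique, dif_neg h]
    obtain ⟨p1, m1⟩ := ih1
    obtain ⟨p2, m2⟩ := ih2
    obtain ⟨pm, mm⟩ := nhsMerge_facts _ _ p1 p2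
    refine ⟨pm, fun x => ?_⟩
    rw [mm x, m1 x, m2 x]
    conv_rhs => rw [← List.take_append_drop (l.length / 2) l]
    exact List.mem_append.symm

-- A's set-building fold: nodup, members = old members ∪ nonempty cleanings
theorem nhsFoldA_facts (ts : List String) : ∀ (s : PySem.Set String), s.Nodup →
    (ts.foldl (fun acc t => if nhsClean t ≠ "" then PySem.Set.add acc (nhsClean t) else acc) s).Nodup
    ∧ (∀ x, x ∈ ts.foldl (fun acc t => if nhsClean t ≠ "" then PySem.Set.add acc (nhsClean t) else acc) s
          ↔ x ∈ s ∨ (∃ t ∈ ts, nhsClean t = x ∧ x ≠ "")) := by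
  induction ts with
  | nil => intro s h; simpa using h
  | cons t ts ih =>
    intro s h
    simp only [List.foldl_cons]
    by_cases hc : nhsClean t ≠ ""
    · rw [if_pos hc]
      obtain ⟨ihp, ihm⟩ := ih _ (PySem.Set.nodup_add _ _ h)
      refine ⟨ihp, fun x => ?_⟩
      rw [ihm x, PySem.Set.mem_add]
      constructor
      · rintro ((hx | rfl) | ⟨u, hu, rfl, hne⟩)
        · exact Or.inl hx
        · exact Or.inr ⟨t, List.mem_cons_self, rfl, hc⟩
        · exact Or.inr ⟨u, List.mem_cons.mpr (Or.inr hu), rfl, hne⟩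
      · rintro (hx | ⟨u, hu, rfl, hne⟩)
        · exact Or.inl (Or.inl hx)
        · rcases List.mem_cons.mp hu with rfl | hu'
          · exact Or.inl (Or.inr rfl)
          · exact Or.inr ⟨u, hu', rfl, hne⟩
    · rw [if_neg hc]
      rw [not_not] at hc
      obtain ⟨ihp, ihm⟩ := ih s h
      refine ⟨ihp, fun x => ?_⟩
      rw [ihm x]
      constructor
      · rintro (hx | ⟨u, hu, rfl, hne⟩)
        · exact Or.inl hx
        · exact Or.inr ⟨u, List.mem_cons.mpr (Or.inr hu), rfl, hne⟩
      · rintro (hx | ⟨u, hu, rfl, hne⟩)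
        · exact Or.inl hx
        · rcases List.mem_cons.mp hu with rfl | hu'
          · exact absurd hc hne
          · exact Or.inr ⟨u, hu', rfl, hne⟩

-- ===== VERDICT =====
theorem normalized_hashtag_set_spec : Claim_equal_normalized_hashtag_set := by
  intro tags _
  unfold Spec_normalized_hashtag_set normalized_hashtag_set normalized_hashtag_set_alt
  cases tags with
  | none => rfl
  | some ts =>
    by_cases h : ts = []
    · simp [h]
    · simp only [if_neg h]
      obtain ⟨hAnd, hAm⟩ := nhsFoldA_facts ts PySem.Set.empty (by simp [PySem.Set.empty])
      obtain ⟨hBp, hBm⟩ := nhsMergeUnique_facts ((ts.map nhsClean).filter (fun s => s ≠ ""))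
      apply PySem.List.sorted_eq_of_perm_of_pairwise_lt
      · have hBnd : (nhsMergeUnique ((ts.map nhsClean).filter (fun s => s ≠ ""))).Nodup :=
          hBp.imp (fun hlt => ne_of_lt hlt)
        refine (List.perm_ext_iff_of_nodup hBnd hAnd).mpr fun x => ?_
        rw [hBm x, hAm x]
        simp [PySem.Set.empty, List.mem_filter, List.mem_map]
        constructor
        · rintro ⟨⟨t, ht, rfl⟩, hne⟩; exact ⟨t, ht, rfl, hne⟩
        · rintro ⟨t, ht, rfl, hne⟩; exact ⟨⟨t, ht, rfl⟩, hne⟩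
      · exact hBp
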